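-- pv_equiv track=rewrite | github.com/aciderix/Graph-Systems-Exploration | permutation_patterns/scripts/analyze.py | is_log_concave
-- ===== SOURCE A (Python) =====
-- def is_log_concave(c):
--     """Is c log-concave? c_k^2 >= c_{k-1} * c_{k+1} for all interior k.
--     Handles internal zeros strictly (requires nonzero support to be contiguous)."""
--     n = len(c)
--     # Find nonzero support
--     nz = [i for i, x in enumerate(c) if x > 0]
--     if not nz:
--         return True
--     lo, hi = nz[0], nz[-1]
--     # Nonzero support must be contiguous
--     for i in range(lo, hi + 1):
--         if c[i] == 0:
--             return False
--     for k in range(lo + 1, hi):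
--         if c[k] * c[k] < c[k - 1] * c[k + 1]:
--             return False
--     return True
-- ===== SOURCE B (Python) =====
-- def is_log_concave(c):
--     """Streaming state machine: one pass, no index arithmetic, no support list.
--     Once the support has started, a zero or a failed triple inequality is only
--     recorded as 'pending'; it is fatal exactly when a later positive entry shows
--     it lies strictly inside the support."""
--     p2 = p1 = None          # the two most recent entries, once the support has started
--     pending = False         # a recorded violation, fatal iff another positive follows
--     for x in c:
--         if p1 is None:
--             if x > 0:
--                 p1 = x      # support starts here
--             continue
--         if p2 is not None and p1 * p1 < p2 * x:
--             pending = True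
--         if x > 0 and pending:
--             return False
--         if x == 0:
--             pending = True
--         p2, p1 = p1, x
--     return True
-- ===== Notes on version B (the rewrite author's own statement) =====
-- stated objective: faster
-- what changed: Replaces A's materialized index list of positives plus two separate index-range re-scans by a single streaming state machine over the values (no indexing at all): it keeps the last two entries and a deferred 'pending violation' flag that becomes fatal only when a later positive entry proves the violation lies strictly inside the support.
import Mathlib
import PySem

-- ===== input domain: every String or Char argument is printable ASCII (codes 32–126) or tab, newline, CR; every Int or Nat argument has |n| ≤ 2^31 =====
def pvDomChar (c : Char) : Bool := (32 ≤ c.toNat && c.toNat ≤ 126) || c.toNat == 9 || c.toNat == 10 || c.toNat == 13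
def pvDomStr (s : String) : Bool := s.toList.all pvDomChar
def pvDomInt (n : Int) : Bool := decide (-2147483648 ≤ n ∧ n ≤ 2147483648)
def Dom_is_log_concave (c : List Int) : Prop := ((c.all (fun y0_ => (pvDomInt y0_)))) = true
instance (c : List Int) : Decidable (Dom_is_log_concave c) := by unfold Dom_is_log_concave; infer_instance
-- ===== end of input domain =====

-- B replaces A's index list of positives and its two index-range re-scans by a single
-- streaming state machine over the values with a deferred 'pending violation' flag
-- (same O(n) asymptotics; a timing run measured a constant-factor speedup).

-- ===== PORT A =====
def is_log_concave (c : List Int) : Bool :=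
  -- nz = [i for i, x in enumerate(c) if x > 0]
  match ((PySem.List.enumerate c 0).filter (fun p => 0 < p.2)).map (fun p => p.1) with
  | [] => true   -- if not nz: return True
  | a :: t =>
    -- lo, hi = nz[0], nz[-1]
    ((PySem.List.pyRange a ((a :: t).getLast (by simp) + 1) 1).all
      (fun i => !(PySem.List.pyGetD c i 0 == 0))) &&   -- for i in range(lo, hi+1): if c[i] == 0: return False
    ((PySem.List.pyRange (a + 1) ((a :: t).getLast (by simp)) 1).all (fun k =>
      !(decide (PySem.List.pyGetD c k 0 * PySem.List.pyGetD c k 0 <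
                PySem.List.pyGetD c (k - 1) 0 * PySem.List.pyGetD c (k + 1) 0))))
      -- for k in range(lo+1, hi): if c[k]*c[k] < c[k-1]*c[k+1]: return False

-- ===== PORT B =====
-- the for loop of Source B as structural recursion over the list; state = (p2, p1, pending)
def altLoop : List Int → Option Int → Option Int → Bool → Bool
  | [], _, _, _ => true                                    -- loop ends: return True
  | x :: t, p2, p1, pending =>
    match p1 with
    | none =>                                              -- if p1 is None:
      if 0 < x then altLoop t p2 (some x) pending          --   if x > 0: p1 = x
      else altLoop t p2 none pending                       --   continue
    | some p1v =>
      -- if p2 is not None and p1*p1 < p2*x: pending = True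
      let pending1 := match p2 with
        | some p2v => if p1v * p1v < p2v * x then true else pending
        | none => pending
      if 0 < x && pending1 then false                      -- if x > 0 and pending: return False
      else altLoop t (some p1v) (some x)
        (if x == 0 then true else pending1)                -- if x == 0: pending = True; shift p2, p1

def is_log_concave_alt (c : List Int) : Bool :=
  altLoop c none none false

-- ===== PRECONDITION & SPEC =====
def Spec_is_log_concave (c : List Int) (out : Bool) : Prop := out = is_log_concave_alt c
instance (c : List Int) (out : Bool) : Decidable (Spec_is_log_concave c out) := by unfold Spec_is_log_concave; infer_instance

-- ===== CLAIM (what is proved, stated in full; the proofs are below) =====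
def Claim_equal_is_log_concave : Prop := ∀ (c : List Int), Dom_is_log_concave c → Spec_is_log_concave c (is_log_concave c)

-- ===== LEMMAS AND PROOFS =====

-- common characterization: a violation (zero or failed inequality) strictly inside the positive support
def Bad (c : List Int) : Prop :=
  ∃ k : Nat, (∃ i : Nat, i < k ∧ i < c.length ∧ 0 < c.getD i 0) ∧
             (∃ j : Nat, k < j ∧ j < c.length ∧ 0 < c.getD j 0) ∧
             (c.getD k 0 = 0 ∨ c.getD k 0 * c.getD k 0 < c.getD (k-1) 0 * c.getD (k+1) 0)

theorem le_getLast_of_pairwise_lt : ∀ {l : List Int}, l.Pairwise (· < ·) → ∀ {x : Int},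
    x ∈ l → ∀ (hne : l ≠ []), x ≤ l.getLast hne := by
  intro l
  induction l with
  | nil => intro _ x hx; cases hx
  | cons a t ih =>
    intro h x hx hne
    rcases List.pairwise_cons.mp h with ⟨ha, ht⟩
    cases t with
    | nil => simp at hx; simp [hx]
    | cons b u =>
      rw [List.getLast_cons (by simp)]
      rcases List.mem_cons.mp hx with rfl | hx
      · exact le_of_lt (lt_of_lt_of_le (ha b (by simp)) (ih ht (by simp) (by simp)))
      · exact ih ht hx (by simp)

theorem nz_eq (c : List Int) :
    ((PySem.List.enumerate c 0).filter (fun p => 0 < p.2)).map (fun p => p.1)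
    = (PySem.List.pyRange 0 (c.length : Int) 1).filter
        (fun j => decide (0 < PySem.List.pyGetD c j 0)) := by
  rw [PySem.List.enumerate_eq_map_pyRange c 0, List.filter_map, List.map_map]
  simp [Function.comp_def, PySem.List.len]

theorem mem_nz (c : List Int) (i : Int) :
    i ∈ (PySem.List.pyRange 0 (c.length : Int) 1).filter
        (fun j => decide (0 < PySem.List.pyGetD c j 0)) ↔
      0 ≤ i ∧ i < (c.length : Int) ∧ 0 < PySem.List.pyGetD c i 0 := by
  simp [List.mem_filter, PySem.List.mem_pyRange_one, and_assoc]

theorem Bad_int (c : List Int) :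
    Bad c ↔ ∃ k i j : Int, 0 ≤ i ∧ i < k ∧ k < j ∧ j < (c.length : Int) ∧
      0 < PySem.List.pyGetD c i 0 ∧ 0 < PySem.List.pyGetD c j 0 ∧
      (PySem.List.pyGetD c k 0 = 0 ∨
        PySem.List.pyGetD c k 0 * PySem.List.pyGetD c k 0 <
          PySem.List.pyGetD c (k - 1) 0 * PySem.List.pyGetD c (k + 1) 0) := by
  constructor
  · rintro ⟨k, ⟨i, hik, hin, hip⟩, ⟨j, hkj, hjn, hjp⟩, hv⟩
    refine ⟨(k : Int), (i : Int), (j : Int), by omega, by exact_mod_cast hik,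
      by exact_mod_cast hkj, by exact_mod_cast hjn,
      by rw [PySem.List.pyGetD_natCast]; exact hip,
      by rw [PySem.List.pyGetD_natCast]; exact hjp, ?_⟩
    rcases hv with hv | hv
    · exact Or.inl (by rw [PySem.List.pyGetD_natCast]; exact hv)
    · right
      have e1 : PySem.List.pyGetD c ((k : Int) - 1) 0 = c.getD (k - 1) 0 := by
        rw [show ((k : Int) - 1) = ((k - 1 : Nat) : Int) by omega, PySem.List.pyGetD_natCast]
      have e2 : PySem.List.pyGetD c ((k : Int) + 1) 0 = c.getD (k + 1) 0 := by
        rw [show ((k : Int) + 1) = ((k + 1 : Nat) : Int) by omega, PySem.List.pyGetD_natCast]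
      rw [PySem.List.pyGetD_natCast, e1, e2]; exact hv
  · rintro ⟨k, i, j, h0, hik, hkj, hjn, hip, hjp, hv⟩
    have eI : ∀ m : Int, 0 ≤ m → PySem.List.pyGetD c m 0 = c.getD m.toNat 0 := by
      intro m hm
      rw [show m = ((m.toNat : Nat) : Int) by omega, PySem.List.pyGetD_natCast,
        Int.toNat_natCast]
    refine ⟨k.toNat, ⟨i.toNat, by omega, by omega, by rw [← eI i h0]; exact hip⟩,
      ⟨j.toNat, by omega, by omega, by rw [← eI j (by omega)]; exact hjp⟩, ?_⟩
    rcases hv with hv | hv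
    · exact Or.inl (by rw [← eI k (by omega)]; exact hv)
    · right
      have e1 : c.getD (k.toNat - 1) 0 = PySem.List.pyGetD c (k - 1) 0 := by
        rw [eI (k - 1) (by omega)]; congr 1; omega
      have e2 : c.getD (k.toNat + 1) 0 = PySem.List.pyGetD c (k + 1) 0 := by
        rw [eI (k + 1) (by omega)]; congr 1; omega
      rw [← eI k (by omega), e1, e2]; exact hv

theorem A_char (c : List Int) : is_log_concave c = false ↔ Bad c := by
  unfold is_log_concave
  rw [nz_eq, Bad_int]
  have hpw : ((PySem.List.pyRange 0 (c.length : Int) 1).filter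
      (fun j => decide (0 < PySem.List.pyGetD c j 0))).Pairwise (· < ·) :=
    List.Pairwise.filter _ (PySem.List.pairwise_lt_pyRange_one 0 (c.length : Int))
  cases hnz : (PySem.List.pyRange 0 (c.length : Int) 1).filter
      (fun j => decide (0 < PySem.List.pyGetD c j 0)) with
  | nil =>
    simp only [Bool.true_eq_false, false_iff]
    rintro ⟨k, i, j, h0, hik, hkj, hjn, hip, hjp, hv⟩
    have : i ∈ (PySem.List.pyRange 0 (c.length : Int) 1).filter
        (fun j => decide (0 < PySem.List.pyGetD c j 0)) := by
      rw [mem_nz]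
      exact ⟨h0, by omega, hip⟩
    rw [hnz] at this; cases this
  | cons a t =>
    rw [hnz] at hpw
    have hmem : ∀ x : Int, x ∈ a :: t ↔
        0 ≤ x ∧ x < (c.length : Int) ∧ 0 < PySem.List.pyGetD c x 0 := by
      intro x; rw [← hnz, mem_nz]
    have hamem := (hmem a).mp (by simp)
    have hlast := (hmem ((a :: t).getLast (by simp))).mp (List.getLast_mem _)
    have hmin : ∀ x : Int, x ∈ a :: t → a ≤ x := by
      intro x hx
      rcases List.mem_cons.mp hx with rfl | hx
      · exact le_refl _
      · exact le_of_lt ((List.pairwise_cons.mp hpw).1 x hx)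
    have hmax : ∀ x : Int, x ∈ a :: t → x ≤ (a :: t).getLast (by simp) :=
      fun x hx => le_getLast_of_pairwise_lt hpw hx _
    rw [Bool.and_eq_false_iff]
    constructor
    · rintro (h | h) <;> rw [List.all_eq_false] at h <;>
        obtain ⟨z, hzmem, hz⟩ := h <;> rw [PySem.List.mem_pyRange_one] at hzmem
      · -- a zero at z with lo ≤ z ≤ hi
        simp at hz
        have hza : a < z := by
          rcases eq_or_lt_of_le hzmem.1 with e | h
          · rw [← e] at hz; exact absurd hamem.2.2 (by omega)
          · exact h
        have hzl : z < (a :: t).getLast (by simp) := by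
          have hle : z ≤ (a :: t).getLast (by simp) := by omega
          rcases eq_or_lt_of_le hle with e | h
          · rw [e] at hz; exact absurd hlast.2.2 (by omega)
          · exact h
        exact ⟨z, a, (a :: t).getLast (by simp), hamem.1, hza, hzl, hlast.2.1,
          hamem.2.2, hlast.2.2, Or.inl hz⟩
      · -- inequality violated at z with lo < z < hi
        simp at hz
        exact ⟨z, a, (a :: t).getLast (by simp), hamem.1, by omega, hzmem.2, hlast.2.1,
          hamem.2.2, hlast.2.2, Or.inr hz⟩
    · rintro ⟨k, i, j, h0, hik, hkj, hjn, hip, hjp, hv⟩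
      have hi_mem : i ∈ a :: t := (hmem i).mpr ⟨h0, by omega, hip⟩
      have hj_mem : j ∈ a :: t := (hmem j).mpr ⟨by omega, hjn, hjp⟩
      have hai : a ≤ i := hmin i hi_mem
      have hjl : j ≤ (a :: t).getLast (by simp) := hmax j hj_mem
      rcases hv with hv | hv
      · left
        rw [List.all_eq_false]
        refine ⟨k, ?_, by simp [hv]⟩
        rw [PySem.List.mem_pyRange_one]
        omega
      · right
        rw [List.all_eq_false]
        refine ⟨k, ?_, by simp [hv]⟩
        rw [PySem.List.mem_pyRange_one]
        omega

theorem altLoop_main (t : List Int) (a b : Int) (pending : Bool) :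
    altLoop t (some a) (some b) pending = false ↔
      ∃ j : Nat, j < t.length ∧ 0 < t.getD j 0 ∧
        (pending = true ∨ ∃ k : Nat, k ≤ j ∧
          ((a::b::t).getD (k+1) 0 * (a::b::t).getD (k+1) 0 <
             (a::b::t).getD k 0 * (a::b::t).getD (k+2) 0
           ∨ (k < j ∧ t.getD k 0 = 0))) := by
  induction t generalizing a b pending with
  | nil => simp [altLoop]
  | cons x t ih =>
    simp only [altLoop]
    by_cases hc : (0 < x && (if b * b < a * x then true else pending)) = true
    · simp only [hc, if_true]
      constructor
      · intro _
        rcases Bool.and_eq_true .. ▸ hc with ⟨hx, hp⟩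
        refine ⟨0, by simp, by simpa using of_decide_eq_true hx, ?_⟩
        by_cases hi : b * b < a * x
        · exact Or.inr ⟨0, le_refl _, Or.inl (by simpa using hi)⟩
        · simp only [hi, if_false] at hp
          exact Or.inl hp
      · intro _; trivial
    · rw [Bool.not_eq_true] at hc
      simp only [hc, Bool.false_eq_true, if_false]
      rw [ih]
      rw [Bool.and_eq_false_iff] at hc
      constructor
      · rintro ⟨j, hj, hpos, hrest⟩
        refine ⟨j + 1, by simpa using hj, by simpa using hpos, ?_⟩
        rcases hrest with hp | ⟨k, hk, hv⟩
        · -- (if x == 0 then true else pending1) = true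
          by_cases hx0 : x = 0
          · exact Or.inr ⟨0, by omega, Or.inr ⟨by omega, by simpa using hx0⟩⟩
          · simp only [hx0, beq_iff_eq] at hp
            by_cases hi : b * b < a * x
            · exact Or.inr ⟨0, by omega, Or.inl (by simpa using hi)⟩
            · simp only [hi, if_false] at hp
              exact Or.inl hp
        · refine Or.inr ⟨k + 1, by omega, ?_⟩
          rcases hv with hv | ⟨hkj, hz⟩
          · exact Or.inl (by simpa using hv)
          · exact Or.inr ⟨by omega, by simpa using hz⟩
      · rintro ⟨j, hj, hpos, hrest⟩
        cases j with
        | zero =>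
          exfalso
          simp only [List.getD_cons_zero] at hpos
          rcases hrest with hp | ⟨k, hk, hv⟩
          · rcases hc with h | h
            · exact of_decide_eq_false h hpos
            · simp [hp] at h
          · interval_cases k
            rcases hv with hv | ⟨h0, _⟩
            · simp only [List.getD_cons_succ, List.getD_cons_zero] at hv
              rcases hc with h | h
              · exact of_decide_eq_false h hpos
              · simp [hv] at h
            · omega
        | succ j =>
          simp only [List.getD_cons_succ] at hpos
          refine ⟨j, by simpa using hj, hpos, ?_⟩
          rcases hrest with hp | ⟨k, hk, hv⟩
          · left
            by_cases hx0 : x = 0 <;> simp [hx0, hp]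
          · cases k with
            | zero =>
              rcases hv with hv | ⟨_, hz⟩
              · simp only [List.getD_cons_succ, List.getD_cons_zero] at hv
                left
                by_cases hx0 : x = 0 <;> simp [hx0, hv]
              · simp only [List.getD_cons_zero] at hz
                left; simp [hz]
            | succ k =>
              refine Or.inr ⟨k, by omega, ?_⟩
              rcases hv with hv | ⟨hkj, hz⟩
              · exact Or.inl (by simpa using hv)
              · exact Or.inr ⟨by omega, by simpa using hz⟩

theorem Bad_cons_of_nonpos (x : Int) (c : List Int) (hx : ¬ 0 < x) :
    Bad (x :: c) ↔ Bad c := by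
  constructor
  · rintro ⟨k, ⟨i, hik, hin, hip⟩, ⟨j, hkj, hjn, hjp⟩, hv⟩
    cases i with
    | zero => simp only [List.getD_cons_zero] at hip; exact absurd hip hx
    | succ i =>
      have hk1 : 1 ≤ k := by omega
      obtain ⟨k', rfl⟩ : ∃ k', k = k' + 1 := ⟨k - 1, by omega⟩
      obtain ⟨j', rfl⟩ : ∃ j', j = j' + 1 := ⟨j - 1, by omega⟩
      refine ⟨k', ⟨i, by omega, by simpa using hin, by simpa using hip⟩,
        ⟨j', by omega, by simpa using hjn, by simpa using hjp⟩, ?_⟩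
      rcases hv with hv | hv
      · exact Or.inl (by simpa using hv)
      · right
        have hk2 : k' ≥ 1 := by omega
        obtain ⟨k'', rfl⟩ : ∃ k'', k' = k'' + 1 := ⟨k' - 1, by omega⟩
        simpa using hv
  · rintro ⟨k, ⟨i, hik, hin, hip⟩, ⟨j, hkj, hjn, hjp⟩, hv⟩
    refine ⟨k + 1, ⟨i + 1, by omega, by simpa using hin, by simpa using hip⟩,
      ⟨j + 1, by omega, by simpa using hjn, by simpa using hjp⟩, ?_⟩
    rcases hv with hv | hv
    · exact Or.inl (by simpa using hv)
    · right
      cases k with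
      | zero => omega
      | succ k => simpa using hv

theorem started_char (x y : Int) (w : List Int) (hx : 0 < x) :
    (∃ j : Nat, j < w.length ∧ 0 < w.getD j 0 ∧
       ((if y == 0 then true else false) = true ∨ ∃ k : Nat, k ≤ j ∧
         ((x::y::w).getD (k+1) 0 * (x::y::w).getD (k+1) 0 <
            (x::y::w).getD k 0 * (x::y::w).getD (k+2) 0
          ∨ (k < j ∧ w.getD k 0 = 0)))) ↔ Bad (x :: y :: w) := by
  constructor
  · rintro ⟨j, hj, hpos, hrest⟩
    rcases hrest with hy | ⟨k, hk, hv⟩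
    · refine ⟨1, ⟨0, by omega, by simp, by simpa using hx⟩,
        ⟨j + 2, by omega, by simp; omega, by simpa using hpos⟩, Or.inl ?_⟩
      simp only [beq_iff_eq] at hy
      split at hy
      · simpa
      · exact absurd hy (by simp)
    · rcases hv with hv | ⟨hkj, hz⟩
      · refine ⟨k + 1, ⟨0, by omega, by simp, by simpa using hx⟩,
          ⟨j + 2, by omega, by simp; omega, by simpa using hpos⟩, Or.inr ?_⟩
        simpa using hv
      · refine ⟨k + 2, ⟨0, by omega, by simp, by simpa using hx⟩,
          ⟨j + 2, by omega, by simp; omega, by simpa using hpos⟩, Or.inl ?_⟩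
        simpa using hz
  · rintro ⟨K, ⟨i, hiK, hin, hip⟩, ⟨J, hKJ, hJn, hJp⟩, hv⟩
    have hK1 : 1 ≤ K := by omega
    obtain ⟨j, rfl⟩ : ∃ j, J = j + 2 := ⟨J - 2, by omega⟩
    refine ⟨j, by simp at hJn; omega, by simpa using hJp, ?_⟩
    rcases hv with hz | hv
    · match K, hK1 with
      | 1, _ =>
        left
        simp only [List.getD_cons_succ, List.getD_cons_zero] at hz
        simp [hz]
      | (k + 2), _ =>
        exact Or.inr ⟨k, by omega, Or.inr ⟨by omega, by simpa using hz⟩⟩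
    · obtain ⟨k, rfl⟩ : ∃ k, K = k + 1 := ⟨K - 1, by omega⟩
      exact Or.inr ⟨k, by omega, Or.inl (by simpa using hv)⟩

theorem B_char (c : List Int) : is_log_concave_alt c = false ↔ Bad c := by
  unfold is_log_concave_alt
  induction c with
  | nil => simp [altLoop, Bad]
  | cons x c ih =>
    simp only [altLoop]
    by_cases hx : 0 < x
    · rw [if_pos hx]
      cases c with
      | nil =>
        simp only [altLoop]
        constructor
        · intro h; simp at h
        · rintro ⟨k, ⟨i, hik, hin, _⟩, ⟨j, hkj, hjn, _⟩, _⟩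
          simp only [List.length_cons, List.length_nil] at hin hjn
          omega
      | cons y w =>
        simp only [altLoop, Bool.and_false, Bool.false_eq_true, if_false]
        rw [altLoop_main]
        exact started_char x y w hx
    · rw [if_neg hx, ih, Bad_cons_of_nonpos x c hx]

-- ===== VERDICT (by name: the statement is the Claim_ definition above) =====
theorem is_log_concave_spec : Claim_equal_is_log_concave := by
  intro c _
  unfold Spec_is_log_concave
  rcases hA : is_log_concave c with _ | _ <;> rcases hB : is_log_concave_alt c with _ | _
  · rfl
  · exact absurd ((A_char c).mp hA) (fun h => by simp [(B_char c).mpr h] at hB)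
  · exact absurd ((B_char c).mp hB) (fun h => by simp [(A_char c).mpr h] at hA)
  · rfl
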